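-- pv_equiv track=rewrite | github.com/jytbard/portfolio | snowflake-statements-creation-script.py | escape_single_quote_in_json
-- ===== SOURCE A (Python) =====
-- def escape_single_quote_in_json(s):
--
--     rstr = ""
--
--     escaped = False
--
--     for c in s:
--
--         if c == "'" and not escaped:
--             c = "\s"
--         elif c == '"':
--             c = '\\' + c
--
--         escaped = (c == "\\")
--
--         rstr += c
--
--     return rstr
-- ===== SOURCE B (Python) =====
-- def escape_single_quote_in_json(s):
--     # Stage 1: split on backslashes; a "'" opening a later piece was escaped, keep it.
--     parts = s.split("\\")
--     fixed = []
--     for i, p in enumerate(parts):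
--         if i > 0 and p.startswith("'"):
--             fixed.append("'" + p[1:].replace("'", "\\s"))
--         else:
--             fixed.append(p.replace("'", "\\s"))
--     # Stage 2: double quotes are escaped unconditionally.
--     return "\\".join(fixed).replace('"', '\\"')
-- ===== Notes on version B (the rewrite author's own statement) =====
-- stated objective: faster
-- what changed: Replaces A's char-by-char loop with a mutable escaped-flag by a staged string-operation pipeline: split the string on backslashes (so escaped positions become piece boundaries), replace quotes piecewise with str.replace while preserving a single quote that opens a later piece, rejoin on backslashes, then escape all double quotes with one final global replace.
import Mathlib
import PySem

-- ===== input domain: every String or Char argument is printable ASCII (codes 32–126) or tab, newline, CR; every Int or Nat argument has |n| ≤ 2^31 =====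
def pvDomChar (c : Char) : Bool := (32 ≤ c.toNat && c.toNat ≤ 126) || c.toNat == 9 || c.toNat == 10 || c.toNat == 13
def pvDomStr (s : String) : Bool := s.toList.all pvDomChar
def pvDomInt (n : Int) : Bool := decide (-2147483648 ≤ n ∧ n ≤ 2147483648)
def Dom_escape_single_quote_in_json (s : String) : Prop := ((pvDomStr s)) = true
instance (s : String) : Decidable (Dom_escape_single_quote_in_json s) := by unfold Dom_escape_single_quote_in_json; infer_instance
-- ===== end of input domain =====

-- B replaces A's char-by-char loop with its mutable escaped-flag by a staged split/replace/join
-- pipeline (split on backslashes, fix each piece, rejoin, then escape double quotes globally),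
-- which a timing run measured faster (bulk string operations instead of per-char appends);
-- return values are proved equal, no argument is mutated.

-- ===== PORT A =====
-- one iteration of A's loop: state = (rstr as chars, escaped)
def escAStep (st : List Char × Bool) (c : Char) : List Char × Bool :=
  let c' : List Char :=
    if c = '\'' ∧ st.2 = false then ['\\', 's']
    else if c = '"' then '\\' :: [c]
    else [c]
  (st.1 ++ c', c' == ['\\'])

def escape_single_quote_in_json (s : String) : String :=
  String.ofList ((s.toList.foldl escAStep ([], false)).1)

-- ===== PORT B =====
-- the body of B's for-loop over enumerate(parts): the piece appended for (i, p)
def escBFix (ip : Int × List Char) : List Char :=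
  if 0 < ip.1 ∧ PySem.Chars.startswith ip.2 ['\''] = true then
    '\'' :: PySem.Chars.replace (PySem.Chars.slice ip.2 (some 1) none) ['\''] ['\\', 's']
  else
    PySem.Chars.replace ip.2 ['\''] ['\\', 's']

def escape_single_quote_in_json_alt (s : String) : String :=
  let parts := PySem.Chars.splitOn s.toList ['\\']
  let fixed := (PySem.List.enumerate parts).foldl (fun acc ip => acc ++ [escBFix ip]) []
  String.ofList (PySem.Chars.replace (PySem.Chars.join ['\\'] fixed) ['"'] ['\\', '"'])

-- ===== PRECONDITION & SPEC =====
def Spec_escape_single_quote_in_json (s : String) (out : String) : Prop := out = escape_single_quote_in_json_alt s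
instance (s : String) (out : String) : Decidable (Spec_escape_single_quote_in_json s out) := by unfold Spec_escape_single_quote_in_json; infer_instance

-- ===== CLAIM (what is proved, stated in full; the proofs are below) =====
def Claim_equal_escape_single_quote_in_json : Prop := ∀ (s : String), Dom_escape_single_quote_in_json s → Spec_escape_single_quote_in_json s (escape_single_quote_in_json s)

-- ===== LEMMAS AND PROOFS =====

-- single-character str.replace is a per-character flatMap
def repl (q : Char) (new : List Char) (l : List Char) : List Char :=
  l.flatMap (fun c => if c = q then new else [c])

lemma replaceGo (q : Char) (new : List Char) :
    ∀ (fuel : Nat) (l acc : List Char), l.length ≤ fuel →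
      PySem.Chars.replace.go [q] new fuel l acc = acc.reverse ++ repl q new l := by
  intro fuel
  induction fuel with
  | zero =>
      intro l acc h
      rw [List.length_eq_zero_iff.mp (Nat.le_zero.mp h)]
      simp [PySem.Chars.replace.go, repl]
  | succ n ih =>
      intro l acc h
      cases l with
      | nil => simp [PySem.Chars.replace.go, repl]
      | cons c t =>
          rw [PySem.Chars.replace.go]
          by_cases hc : q = c
          · subst hc
            simp [List.isPrefixOf, repl, ih t _ (by simpa using h)]
          · simp [List.isPrefixOf, hc, repl, ih t _ (by simpa using h), Ne.symm hc]

lemma replace_single (q : Char) (new l : List Char) :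
    PySem.Chars.replace l [q] new = repl q new l := by
  simpa using replaceGo q new l.length l [] le_rfl

-- single-character str.split, structurally
def split1 (q : Char) : List Char → List (List Char)
  | [] => [[]]
  | c :: t => if c = q then [] :: split1 q t
              else match split1 q t with
                   | [] => [[c]]
                   | p :: ps => (c :: p) :: ps

lemma split1_ne_nil (q : Char) (l : List Char) : split1 q l ≠ [] := by
  cases l with
  | nil => simp [split1]
  | cons c t => simp only [split1]; split <;> [skip; split] <;> simp

lemma splitGo (q : Char) :
    ∀ (fuel : Nat) (l cur : List Char) (acc : List (List Char)), l.length ≤ fuel →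
      PySem.Chars.splitOn.go [q] fuel l cur acc =
        acc.reverse ++ (match split1 q l with
                        | [] => [cur.reverse]
                        | p :: ps => (cur.reverse ++ p) :: ps) := by
  intro fuel
  induction fuel with
  | zero =>
      intro l cur acc h
      rw [List.length_eq_zero_iff.mp (Nat.le_zero.mp h)]
      simp [PySem.Chars.splitOn.go, split1]
  | succ n ih =>
      intro l cur acc h
      cases l with
      | nil => simp [PySem.Chars.splitOn.go, split1]
      | cons c t =>
          rw [PySem.Chars.splitOn.go]
          by_cases hc : q = c
          · subst hc
            simp only [List.isPrefixOf, Bool.and_true, beq_self_eq_true, if_pos]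
            have hd : List.drop [q].length (q :: t) = t := by simp
            rw [hd, ih t [] _ (by simpa using h)]
            simp [split1]
            cases hs : split1 q t with
            | nil => exact absurd hs (split1_ne_nil q t)
            | cons p ps => simp
          · rw [if_neg (by simp [List.isPrefixOf]; exact hc)]
            rw [ih t _ _ (by simpa using h)]
            simp [split1, Ne.symm hc]
            cases hs : split1 q t with
            | nil => exact absurd hs (split1_ne_nil q t)
            | cons p ps => simp

lemma splitOn_single (q : Char) (l : List Char) :
    PySem.Chars.splitOn l [q] = split1 q l := by
  show PySem.Chars.splitOn.go [q] (l.length + 1) l [] [] = _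
  rw [splitGo q _ l [] [] (by omega)]
  cases hs : split1 q l with
  | nil => exact absurd hs (split1_ne_nil q l)
  | cons p ps => simp

-- the common specification: what both programs emit per character,
-- given whether the previous character was a backslash
def escRepl (e : Bool) (c : Char) : List Char :=
  if c = '\'' ∧ e = false then ['\\', 's']
  else if c = '"' then '\\' :: [c]
  else [c]

def escSpec (e : Bool) : List Char → List Char
  | [] => []
  | c :: t => escRepl e c ++ escSpec (decide (c = '\\')) t

-- quote-only stage (double quotes untouched)
def esc1 (e : Bool) : List Char → List Char
  | [] => []
  | c :: t => (if c = '\'' ∧ e = false then ['\\', 's'] else [c]) ++ esc1 (decide (c = '\\')) t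

-- A side
lemma escAStep_eq (st : List Char × Bool) (c : Char) :
    escAStep st c = (st.1 ++ escRepl st.2 c, decide (c = '\\')) := by
  unfold escAStep escRepl
  by_cases h1 : c = '\'' ∧ st.2 = false
  · obtain ⟨rfl, h⟩ := h1; simp [h]
  · simp only [if_neg h1]
    by_cases h2 : c = '"'
    · subst h2; simp
    · simp only [if_neg h2]
      by_cases h3 : c = '\\' <;> simp [h3]

lemma escA_foldl (l : List Char) (acc : List Char) (e : Bool) :
    (l.foldl escAStep (acc, e)).1 = acc ++ escSpec e l := by
  induction l generalizing acc e with
  | nil => simp [escSpec]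
  | cons c t ih =>
      simp only [List.foldl_cons, escAStep_eq, ih, escSpec, List.append_assoc]

-- B side: the fix applied to every piece but the first
def fix1 (p : List Char) : List Char :=
  if PySem.Chars.startswith p ['\''] = true then '\'' :: repl '\'' ['\\', 's'] (p.drop 1)
  else repl '\'' ['\\', 's'] p

lemma escBFix_zero (p : List Char) : escBFix (0, p) = repl '\'' ['\\', 's'] p := by
  simp [escBFix, replace_single]

lemma escBFix_pos (n : Int) (hn : 0 < n) (p : List Char) : escBFix (n, p) = fix1 p := by
  unfold escBFix fix1
  by_cases h : PySem.Chars.startswith p ['\''] = true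
  · simp [hn, h, replace_single, PySem.List.slice_from]
  · simp [h, replace_single]

lemma map_escBFix_enumerate (ps : List (List Char)) :
    ∀ (n : Int), 1 ≤ n → (PySem.List.enumerate ps n).map escBFix = ps.map fix1 := by
  induction ps with
  | nil => intro n _; simp [PySem.List.enumerate_nil]
  | cons p t ih =>
      intro n hn
      rw [PySem.List.enumerate_cons, List.map_cons, List.map_cons,
        escBFix_pos n (by omega) p, ih (n + 1) (by omega)]

-- join over a first piece that is itself an append
lemma join_head_append (x y : List Char) (ys : List (List Char)) :
    PySem.Chars.join ['\\'] ((x ++ y) :: ys) = x ++ PySem.Chars.join ['\\'] (y :: ys) := by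
  cases ys with
  | nil => simp [PySem.Chars.join_singleton]
  | cons z zs => simp [PySem.Chars.join_cons_cons]

-- the split/fix/join pipeline equals the quote-only stage, for both first-piece shapes
lemma joinPQ (l : List Char) :
    (∀ p ps, split1 '\\' l = p :: ps →
      PySem.Chars.join ['\\'] (repl '\'' ['\\', 's'] p :: ps.map fix1) = esc1 false l) ∧
    PySem.Chars.join ['\\'] ((split1 '\\' l).map fix1) = esc1 true l := by
  induction l with
  | nil =>
      constructor
      · intro p ps h
        simp [split1] at h
        obtain ⟨rfl, rfl⟩ := h
        simp [PySem.Chars.join_singleton, repl, esc1]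
      · simp [split1, fix1, PySem.Chars.startswith, PySem.Chars.join_singleton, repl, esc1]
  | cons c t ih =>
      by_cases hc : c = '\\'
      · subst hc
        have hsp : split1 '\\' ('\\' :: t) = [] :: split1 '\\' t := by simp [split1]
        obtain ⟨p, ps, hps⟩ : ∃ p ps, split1 '\\' t = p :: ps := by
          cases hs : split1 '\\' t with
          | nil => exact absurd hs (split1_ne_nil _ t)
          | cons p ps => exact ⟨p, ps, rfl⟩
        constructor
        · intro p' ps' h
          rw [hsp] at h
          obtain ⟨rfl, rfl⟩ := List.cons.inj h
          have h0 : repl '\'' ['\\', 's'] ([] : List Char) = [] := by simp [repl]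
          rw [h0, hps, List.map_cons, PySem.Chars.join_cons_cons, ← List.map_cons, ← hps, ih.2]
          simp [esc1]
        · rw [hsp, List.map_cons]
          have h0 : fix1 ([] : List Char) = [] := by simp [fix1, PySem.Chars.startswith, repl]
          rw [h0, hps, List.map_cons, PySem.Chars.join_cons_cons, ← List.map_cons, ← hps, ih.2]
          simp [esc1]
      · obtain ⟨p, ps, hps⟩ : ∃ p ps, split1 '\\' t = p :: ps := by
          cases hs : split1 '\\' t with
          | nil => exact absurd hs (split1_ne_nil _ t)
          | cons p ps => exact ⟨p, ps, rfl⟩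
        have hsp : split1 '\\' (c :: t) = (c :: p) :: ps := by simp [split1, hc, hps]
        have hhd : repl '\'' ['\\', 's'] (c :: p)
            = (if c = '\'' then ['\\', 's'] else [c]) ++ repl '\'' ['\\', 's'] p := by
          by_cases hq : c = '\'' <;> simp [repl, hq]
        constructor
        · intro p' ps' h
          rw [hsp] at h
          obtain ⟨rfl, rfl⟩ := List.cons.inj h
          rw [hhd, join_head_append, ih.1 p ps hps]
          by_cases hq : c = '\'' <;> simp [esc1, hq, hc]
        · rw [hsp, List.map_cons]
          by_cases hq : c = '\''
          · subst hq
            have : fix1 ('\'' :: p) = '\'' :: repl '\'' ['\\', 's'] p := by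
              simp [fix1, PySem.Chars.startswith, List.isPrefixOf]
            rw [this]
            show PySem.Chars.join ['\\'] ((['\''] ++ repl '\'' ['\\', 's'] p) :: ps.map fix1) = _
            rw [join_head_append, ih.1 p ps hps]
            simp [esc1, hc]
          · have : fix1 (c :: p) = repl '\'' ['\\', 's'] (c :: p) := by
              simp only [fix1, PySem.Chars.startswith, List.isPrefixOf]
              rw [if_neg (by simp [Ne.symm hq])]
            rw [this, hhd, if_neg hq, join_head_append, ih.1 p ps hps]
            simp [esc1, hq, hc]

-- the double-quote stage turns the quote-only stage into the full spec
lemma repl_append (q : Char) (n x y : List Char) :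
    repl q n (x ++ y) = repl q n x ++ repl q n y := by
  simp [repl]

lemma repl_dq_esc1 (e : Bool) (l : List Char) :
    repl '"' ['\\', '"'] (esc1 e l) = escSpec e l := by
  induction l generalizing e with
  | nil => simp [esc1, escSpec, repl]
  | cons c t ih =>
      show repl '"' ['\\', '"']
            ((if c = '\'' ∧ e = false then ['\\', 's'] else [c]) ++ esc1 (decide (c = '\\')) t)
          = escRepl e c ++ escSpec (decide (c = '\\')) t
      rw [repl_append, ih]
      congr 1
      unfold escRepl
      by_cases h1 : c = '\'' ∧ e = false
      · obtain ⟨rfl, rfl⟩ := h1; simp [repl]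
      · rw [if_neg h1, if_neg h1]
        by_cases h2 : c = '"' <;> simp [repl, h2]

-- ===== VERDICT (by name: the statement is the Claim_ definition above) =====
theorem escape_single_quote_in_json_spec : Claim_equal_escape_single_quote_in_json := by
  intro s _
  unfold Spec_escape_single_quote_in_json escape_single_quote_in_json escape_single_quote_in_json_alt
  show String.ofList ((s.toList.foldl escAStep ([], false)).1)
      = String.ofList (PySem.Chars.replace (PySem.Chars.join ['\\']
          ((PySem.List.enumerate (PySem.Chars.splitOn s.toList ['\\'])).foldl
            (fun acc ip => acc ++ [escBFix ip]) [])) ['"'] ['\\', '"'])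
  rw [escA_foldl, List.nil_append, PySem.List.foldl_append_singleton_eq_map, List.nil_append,
    splitOn_single]
  obtain ⟨p, ps, hps⟩ : ∃ p ps, split1 '\\' s.toList = p :: ps := by
    cases hs : split1 '\\' s.toList with
    | nil => exact absurd hs (split1_ne_nil _ _)
    | cons p ps => exact ⟨p, ps, rfl⟩
  rw [hps, PySem.List.enumerate_cons, List.map_cons, escBFix_zero,
    map_escBFix_enumerate ps (0 + 1) (by omega), replace_single,
    (joinPQ s.toList).1 p ps hps, repl_dq_esc1]
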